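-- pv_equiv track=rewrite | github.com/AIRI-Institute/maestro-core | lib--mmar-carl/examples/runner.py | detect_errors_in_output
-- ===== SOURCE A (Python) =====
-- ERROR_PATTERNS = [
--     "Traceback (most recent",
--     "Task exception was never retrieved",
--     "Task was destroyed but it is pending",
--     "AttributeError:",
--     "TypeError:",
--     "ValueError:",
--     "KeyError:",
--     "ImportError:",
--     "RuntimeError:",
--     "Exception ignored in:",
--     "Unhandled exception",
--     "Error:",  # With colon to avoid matching "error" in strings
-- ]
--
-- LENIENT_CHECK_EXAMPLES = {
--     "conditions_example.py",  # Tests conditions with "error" in test data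
--     "reflection_example.py",  # Tests error handling with expected RuntimeError
-- }
--
-- def detect_errors_in_output(stdout: str, stderr: str, example_name: str = "") -> tuple[bool, str]:
--     """Detect error patterns in output even if exit code is 0.
--
--     Args:
--         stdout: Standard output from the process
--         stderr: Standard error from the process
--         example_name: Name of the example file for lenient checking
--
--     Returns:
--         (has_errors, error_details)
--     """
--     # For lenient examples, only check for severe errors
--     if example_name in LENIENT_CHECK_EXAMPLES:
--         severe_patterns = [
--             "Traceback (most recent",
--             "Task exception was never retrieved",
--             "Unhandled exception",
--         ]
--         all_output = f"{stderr}\n{stdout}"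
--         for pattern in severe_patterns:
--             if pattern in all_output:
--                 for line in all_output.split("\n"):
--                     if pattern in line:
--                         return True, line.strip()[:100]
--         return False, ""
--
--     # For normal examples, check all error patterns
--     # Combine stderr and stdout for error detection
--     all_output = f"{stderr}\n{stdout}"
--
--     # Check for error patterns
--     for pattern in ERROR_PATTERNS:
--         if pattern in all_output:
--             # Find the line with the error
--             for line in all_output.split("\n"):
--                 if pattern in line:
--                     return True, line.strip()[:100]
--
--     return False, ""
-- ===== SOURCE B (Python) =====
-- ERROR_PATTERNS = [
--     "Traceback (most recent",
--     "Task exception was never retrieved",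
--     "Task was destroyed but it is pending",
--     "AttributeError:",
--     "TypeError:",
--     "ValueError:",
--     "KeyError:",
--     "ImportError:",
--     "RuntimeError:",
--     "Exception ignored in:",
--     "Unhandled exception",
--     "Error:",
-- ]
--
-- LENIENT_CHECK_EXAMPLES = {
--     "conditions_example.py",
--     "reflection_example.py",
-- }
--
-- SEVERE_PATTERNS = [
--     "Traceback (most recent",
--     "Task exception was never retrieved",
--     "Unhandled exception",
-- ]
--
--
-- def detect_errors_in_output(stdout: str, stderr: str, example_name: str = "") -> tuple[bool, str]:
--     """One pass over the lines builds a first-occurrence table pattern -> stripped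
--     line[:100]; a priority lookup over the pattern list then picks the winner."""
--     patterns = SEVERE_PATTERNS if example_name in LENIENT_CHECK_EXAMPLES else ERROR_PATTERNS
--     all_output = f"{stderr}\n{stdout}"
--     first_hit = {}
--     for line in all_output.split("\n"):
--         for pattern in patterns:
--             if pattern in line and pattern not in first_hit:
--                 first_hit[pattern] = line.strip()[:100]
--     for pattern in patterns:
--         hit = first_hit.get(pattern)
--         if hit is not None:
--             return True, hit
--     return False, ""
-- ===== Notes on version B (the rewrite author's own statement) =====
-- stated objective: alternative
-- what changed: Replaces A's per-pattern rescans of the whole output (substring test on all_output, then a fresh scan of all lines for each pattern) by one pass over the lines that builds a first-occurrence table pattern -> stripped line[:100], followed by a priority lookup over the pattern list.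
import Mathlib
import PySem

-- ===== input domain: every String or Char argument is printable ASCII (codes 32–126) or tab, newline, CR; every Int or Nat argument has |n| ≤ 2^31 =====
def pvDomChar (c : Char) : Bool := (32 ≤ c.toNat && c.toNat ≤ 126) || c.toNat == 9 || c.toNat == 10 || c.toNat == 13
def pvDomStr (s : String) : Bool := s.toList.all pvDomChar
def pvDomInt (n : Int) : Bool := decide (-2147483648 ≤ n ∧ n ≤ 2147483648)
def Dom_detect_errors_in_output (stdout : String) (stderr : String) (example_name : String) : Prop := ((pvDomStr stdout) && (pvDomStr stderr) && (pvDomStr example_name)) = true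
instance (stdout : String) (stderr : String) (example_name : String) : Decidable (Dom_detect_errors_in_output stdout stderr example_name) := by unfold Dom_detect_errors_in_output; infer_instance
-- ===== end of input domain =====

-- B replaces A's per-pattern rescans by one pass over the lines building a first-hit
-- table followed by a priority lookup over the patterns (objective: alternative).

-- shared module-level constants (both Python files carry them)
def pvErrorPatterns : List (List Char) :=
  [ "Traceback (most recent".toList,
    "Task exception was never retrieved".toList,
    "Task was destroyed but it is pending".toList,
    "AttributeError:".toList,
    "TypeError:".toList,
    "ValueError:".toList,
    "KeyError:".toList,
    "ImportError:".toList,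
    "RuntimeError:".toList,
    "Exception ignored in:".toList,
    "Unhandled exception".toList,
    "Error:".toList ]

def pvSeverePatterns : List (List Char) :=
  [ "Traceback (most recent".toList,
    "Task exception was never retrieved".toList,
    "Unhandled exception".toList ]

def pvLenientExamples : List String := ["conditions_example.py", "reflection_example.py"]

-- line.strip()[:100] (both Pythons compute this same expression)
def pvClip (l : List Char) : String :=
  String.ofList (PySem.Chars.slice (PySem.Chars.strip l) none (some 100))

-- ===== PORT A =====
-- inner 'for line in all_output.split("\n"): if pattern in line: return True, line.strip()[:100]'
def pvInnerA (p : List Char) : List (List Char) → Option (Bool × String)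
  | [] => none
  | l :: ls => if PySem.Chars.isIn p l then some (true, pvClip l) else pvInnerA p ls

-- outer 'for pattern in patterns: if pattern in all_output: <inner loop>'
def pvLoopA (allOut : List Char) (lines : List (List Char)) : List (List Char) → Bool × String
  | [] => (false, "")
  | p :: ps =>
    if PySem.Chars.isIn p allOut then
      match pvInnerA p lines with
      | some r => r
      | none => pvLoopA allOut lines ps
    else pvLoopA allOut lines ps

def detect_errors_in_output (stdout : String) (stderr : String) (example_name : String) : Bool × String :=
  if pvLenientExamples.contains example_name then
    let allOut := stderr.toList ++ '\n' :: stdout.toList          -- f"{stderr}\n{stdout}"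
    pvLoopA allOut (PySem.Chars.splitOn allOut ['\n']) pvSeverePatterns
  else
    let allOut := stderr.toList ++ '\n' :: stdout.toList
    pvLoopA allOut (PySem.Chars.splitOn allOut ['\n']) pvErrorPatterns

-- ===== PORT B =====
-- one pass over the lines: record pattern -> first stripped[:100] line containing it
def pvTable (patterns : List (List Char)) (lines : List (List Char)) :
    PySem.Dict (List Char) String :=
  lines.foldl
    (fun d line =>
      patterns.foldl
        (fun d p =>
          if PySem.Chars.isIn p line && !(d.contains p) then d.insert p (pvClip line) else d)
        d)
    PySem.Dict.empty

-- priority lookup: 'for pattern in patterns: hit = first_hit.get(pattern); if hit is not None: return True, hit'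
def pvLookupB (d : PySem.Dict (List Char) String) : List (List Char) → Bool × String
  | [] => (false, "")
  | p :: ps =>
    match d.get? p with
    | some v => (true, v)
    | none => pvLookupB d ps

def detect_errors_in_output_alt (stdout : String) (stderr : String) (example_name : String) : Bool × String :=
  let patterns := if pvLenientExamples.contains example_name then pvSeverePatterns else pvErrorPatterns
  let allOut := stderr.toList ++ '\n' :: stdout.toList
  pvLookupB (pvTable patterns (PySem.Chars.splitOn allOut ['\n'])) patterns

-- ===== PRECONDITION & SPEC =====
def Spec_detect_errors_in_output (stdout : String) (stderr : String) (example_name : String) (out : Bool × String) : Prop := out = detect_errors_in_output_alt stdout stderr example_name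
instance (stdout : String) (stderr : String) (example_name : String) (out : Bool × String) : Decidable (Spec_detect_errors_in_output stdout stderr example_name out) := by unfold Spec_detect_errors_in_output; infer_instance

-- ===== CLAIM (what is proved, stated in full; the proofs are below) =====
def Claim_equal_detect_errors_in_output : Prop := ∀ (stdout : String) (stderr : String) (example_name : String), Dom_detect_errors_in_output stdout stderr example_name → Spec_detect_errors_in_output stdout stderr example_name (detect_errors_in_output stdout stderr example_name)

-- ===== LEMMAS AND PROOFS =====

-- every chunk produced by splitOn is an infix of the split string
theorem pv_go_infix (sep s : List Char) : ∀ (fuel : Nat) (l cur : List Char) (acc : List (List Char)),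
    cur.reverse ++ l <:+ s → (∀ x ∈ acc, x <:+: s) →
    ∀ c ∈ PySem.Chars.splitOn.go sep fuel l cur acc, c <:+: s := by
  intro fuel
  induction fuel with
  | zero =>
    intro l cur acc h hacc c hc
    rw [PySem.Chars.splitOn.go.eq_def] at hc
    simp only [List.mem_reverse, List.mem_cons] at hc
    rcases hc with hc | hc
    · exact hc ▸ h.isInfix
    · exact hacc c hc
  | succ n ih =>
    intro l cur acc h hacc c hc
    rw [PySem.Chars.splitOn.go.eq_def] at hc
    cases l with
    | nil =>
      simp only [List.mem_reverse, List.mem_cons] at hc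
      rcases hc with hc | hc
      · subst hc
        exact List.IsSuffix.isInfix (by simpa using h)
      · exact hacc c hc
    | cons a rest =>
      by_cases hp : sep.isPrefixOf (a :: rest) = true
      · simp only [hp] at hc
        refine ih _ [] _ ?_ ?_ c hc
        · simp only [List.reverse_nil, List.nil_append]
          exact (List.drop_suffix _ _).trans ((List.suffix_append cur.reverse (a :: rest)).trans h)
        · intro x hx
          rcases List.mem_cons.mp hx with hx | hx
          · subst hx
            exact ((List.prefix_append cur.reverse (a :: rest)).isInfix).trans h.isInfix
          · exact hacc x hx
      · simp only [hp] at hc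
        refine ih rest (a :: cur) acc ?_ hacc c hc
        simpa using h

theorem pv_splitOn_infix (s sep : List Char) {c : List Char} (hc : c ∈ PySem.Chars.splitOn s sep) :
    c <:+: s := by
  rw [PySem.Chars.splitOn] at hc
  exact pv_go_infix sep s _ s [] [] (by simp) (by simp) c hc

-- the first line containing p (proof-side characterisation of both loops)
def pvFirst (p : List Char) : List (List Char) → Option (List Char)
  | [] => none
  | l :: ls => if PySem.Chars.isIn p l then some l else pvFirst p ls

theorem pvInnerA_eq (p : List Char) (lines : List (List Char)) :
    pvInnerA p lines = (pvFirst p lines).map (fun l => (true, pvClip l)) := by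
  induction lines with
  | nil => rfl
  | cons l ls ih =>
    simp only [pvInnerA, pvFirst]
    split <;> simp [ih]

theorem pvFirst_some (p : List Char) (lines : List (List Char)) {l : List Char}
    (h : pvFirst p lines = some l) : l ∈ lines ∧ PySem.Chars.isIn p l = true := by
  induction lines with
  | nil => simp [pvFirst] at h
  | cons a ls ih =>
    simp only [pvFirst] at h
    by_cases ha : PySem.Chars.isIn p a = true
    · rw [if_pos ha] at h
      cases h
      exact ⟨List.mem_cons_self, ha⟩
    · rw [if_neg ha] at h
      obtain ⟨hm, hi⟩ := ih h
      exact ⟨List.mem_cons_of_mem _ hm, hi⟩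

-- the inner per-line fold of B, read at one pattern
theorem pv_record_get? (line : List Char) (p : List Char) :
    ∀ (ps : List (List Char)) (d : PySem.Dict (List Char) String),
      (ps.foldl (fun d q =>
          if PySem.Chars.isIn q line && !(d.contains q) then d.insert q (pvClip line) else d) d).get? p
      = if p ∈ ps ∧ PySem.Chars.isIn p line = true ∧ d.contains p = false
        then some (pvClip line) else d.get? p := by
  intro ps
  induction ps with
  | nil => intro d; simp
  | cons q qs ih =>
    intro d
    simp only [List.foldl_cons]
    by_cases hqp : q = p
    · subst hqp
      by_cases hin : PySem.Chars.isIn q line = true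
      · by_cases hct : d.contains q = true
        · rw [if_neg (by simp [hin, hct]), ih]
          simp [hin, hct]
        · have hctf : d.contains q = false := by simpa using hct
          rw [if_pos (by simp [hin, hctf]), ih]
          simp [PySem.Dict.contains_insert_self, PySem.Dict.get?_insert_self, hin, hctf]
      · rw [if_neg (by simp [hin]), ih]
        simp [hin]
    · have hne : p ≠ q := fun h => hqp h.symm
      by_cases hcond : (PySem.Chars.isIn q line && !(d.contains q)) = true
      · rw [if_pos hcond, ih]
        rw [PySem.Dict.get?_insert_of_ne _ _ hne, PySem.Dict.contains_insert]
        simp only [List.mem_cons]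
        simp [beq_eq_false_iff_ne.mpr hne, Ne.symm hqp]
      · rw [if_neg hcond, ih]
        simp [List.mem_cons, Ne.symm hqp]

-- the whole table, read at one pattern p taken from the pattern list
theorem pv_table_get? (patterns : List (List Char)) (p : List Char) (hp : p ∈ patterns) :
    ∀ (lines : List (List Char)) (d : PySem.Dict (List Char) String),
      (lines.foldl (fun d line =>
          patterns.foldl (fun d q =>
            if PySem.Chars.isIn q line && !(d.contains q) then d.insert q (pvClip line) else d) d)
        d).get? p
      = if d.contains p then d.get? p else (pvFirst p lines).map pvClip := by
  intro lines
  induction lines with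
  | nil =>
    intro d
    by_cases hct : d.contains p = true
    · simp [hct]
    · have hctf : d.contains p = false := by simpa using hct
      have hdn : d.get? p = none := by
        have h := PySem.Dict.contains_eq_isSome_get? d p
        rw [hctf] at h
        cases hdg : d.get? p with
        | none => rfl
        | some v => rw [hdg] at h; simp at h
      simp [hctf, pvFirst, hdn]
  | cons line ls ih =>
    intro d
    simp only [List.foldl_cons]
    rw [ih]
    have hg := pv_record_get? line p patterns d
    have hc' := PySem.Dict.contains_eq_isSome_get?
      (patterns.foldl (fun d q =>
        if PySem.Chars.isIn q line && !(d.contains q) then d.insert q (pvClip line) else d) d) p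
    by_cases hct : d.contains p = true
    · have h1 : (patterns.foldl (fun d q =>
          if PySem.Chars.isIn q line && !(d.contains q) then d.insert q (pvClip line) else d) d).get? p
          = d.get? p := by rw [hg]; simp [hct]
      have h2 : (patterns.foldl (fun d q =>
          if PySem.Chars.isIn q line && !(d.contains q) then d.insert q (pvClip line) else d) d).contains p
          = true := by
        rw [hc', h1, ← PySem.Dict.contains_eq_isSome_get?, hct]
      rw [h2, h1, hct]
      simp
    · have hctf : d.contains p = false := by simpa using hct
      have hdn : d.get? p = none := by
        have h := PySem.Dict.contains_eq_isSome_get? d p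
        rw [hctf] at h
        cases hdg : d.get? p with
        | none => rfl
        | some v => rw [hdg] at h; simp at h
      by_cases hin : PySem.Chars.isIn p line = true
      · have h1 : (patterns.foldl (fun d q =>
            if PySem.Chars.isIn q line && !(d.contains q) then d.insert q (pvClip line) else d) d).get? p
            = some (pvClip line) := by rw [hg]; simp [hp, hin, hctf]
        have h2 : (patterns.foldl (fun d q =>
            if PySem.Chars.isIn q line && !(d.contains q) then d.insert q (pvClip line) else d) d).contains p
            = true := by rw [hc', h1]; rfl
        rw [h2, h1, hctf]
        simp [pvFirst, hin]
      · have h1 : (patterns.foldl (fun d q =>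
            if PySem.Chars.isIn q line && !(d.contains q) then d.insert q (pvClip line) else d) d).get? p
            = d.get? p := by rw [hg]; simp [hin]
        have h2 : (patterns.foldl (fun d q =>
            if PySem.Chars.isIn q line && !(d.contains q) then d.insert q (pvClip line) else d) d).contains p
            = false := by rw [hc', h1, ← PySem.Dict.contains_eq_isSome_get?, hctf]
        have hinf : PySem.Chars.isIn p line = false := by simpa using hin
        rw [h2, h1, hctf]
        simp [pvFirst, hinf]

-- the two loops agree, given every looked-up pattern is in the table's pattern list
theorem pv_loop_eq (allOut : List Char) (patterns : List (List Char)) :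
    ∀ (ps : List (List Char)), (∀ p ∈ ps, p ∈ patterns) →
      pvLoopA allOut (PySem.Chars.splitOn allOut ['\n']) ps
        = pvLookupB (pvTable patterns (PySem.Chars.splitOn allOut ['\n'])) ps := by
  intro ps
  induction ps with
  | nil => intro _; rfl
  | cons p rest ih =>
    intro hsub
    have hget : (pvTable patterns (PySem.Chars.splitOn allOut ['\n'])).get? p
        = (pvFirst p (PySem.Chars.splitOn allOut ['\n'])).map pvClip := by
      rw [pvTable, pv_table_get? patterns p (hsub p List.mem_cons_self)]
      simp [PySem.Dict.contains_empty]
    have hrest := ih (fun q hq => hsub q (List.mem_cons_of_mem _ hq))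
    cases hf : pvFirst p (PySem.Chars.splitOn allOut ['\n']) with
    | some l =>
      obtain ⟨hmem, hin⟩ := pvFirst_some p _ hf
      have hinfix : p <:+: allOut :=
        ((PySem.Chars.isIn_iff_infix p l).mp hin).trans (pv_splitOn_infix allOut ['\n'] hmem)
      have hall : PySem.Chars.isIn p allOut = true := (PySem.Chars.isIn_iff_infix p allOut).mpr hinfix
      simp only [pvLoopA, pvLookupB, hall, if_true, pvInnerA_eq, hf, hget, Option.map_some]
    | none =>
      simp only [pvLoopA, pvLookupB, pvInnerA_eq, hf, hget, Option.map_none]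
      split <;> exact hrest

-- ===== VERDICT (by name: the statement is the Claim_ definition above) =====
theorem detect_errors_in_output_spec : Claim_equal_detect_errors_in_output := by
  intro stdout stderr example_name _
  unfold Spec_detect_errors_in_output detect_errors_in_output detect_errors_in_output_alt
  cases hl : pvLenientExamples.contains example_name with
  | true =>
    simp only [if_true]
    exact pv_loop_eq _ pvSeverePatterns pvSeverePatterns (fun _ h => h)
  | false =>
    simp only [Bool.false_eq_true, if_false]
    exact pv_loop_eq _ pvErrorPatterns pvErrorPatterns (fun _ h => h)
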